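-- pv_equiv track=rewrite | github.com/M4xi1m3/torseurs | test.py | __split_numbers
-- ===== SOURCE A (Python) =====
-- def __split_numbers(text):
--     number = "";
--     var = "";
--     var_name = False;
--     for c in text:
--         if (c in "-+0123456789." and var_name == False):
--             number += c;
--         else:
--             var_name = True;
--         if (var_name):
--             var += c;
--     return (number, var);
-- ===== SOURCE B (Python) =====
-- def __split_numbers(text):
--     i = next((j for j, c in enumerate(text) if c not in "-+0123456789."), len(text))
--     return (text[:i], text[i:])
-- ===== Notes on version B (the rewrite author's own statement) =====
-- stated objective: simpler
-- what changed: Replaces the flag-driven character-by-character accumulation with finding the first non-numeric-character index and returning two slices, which also avoids O(n) incremental string concatenation.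
import Mathlib
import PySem

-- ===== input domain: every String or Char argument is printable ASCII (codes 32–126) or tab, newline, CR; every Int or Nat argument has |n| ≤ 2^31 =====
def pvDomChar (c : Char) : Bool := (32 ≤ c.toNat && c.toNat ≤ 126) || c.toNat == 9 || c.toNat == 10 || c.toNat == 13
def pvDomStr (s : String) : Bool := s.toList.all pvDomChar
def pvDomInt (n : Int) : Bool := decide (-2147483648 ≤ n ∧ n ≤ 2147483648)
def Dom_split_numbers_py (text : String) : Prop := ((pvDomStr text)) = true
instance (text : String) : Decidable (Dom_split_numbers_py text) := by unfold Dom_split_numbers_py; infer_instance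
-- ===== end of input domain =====

-- B replaces A's flag-driven accumulation loop with a first-boundary find plus two slices (simpler decomposition, same cost).

-- ===== PORT A =====
-- membership test 'c in "-+0123456789."'
def pvAllowed (c : Char) : Bool := "-+0123456789.".toList.contains c

-- loop body of A: state (number, var, var_name)
def pvStepA (st : List Char × List Char × Bool) (c : Char) : List Char × List Char × Bool :=
  match st with
  | (number, var, var_name) =>
    let (number, var_name) :=
      if pvAllowed c && var_name == false then (number ++ [c], var_name)
      else (number, true)
    let var := if var_name then var ++ [c] else var
    (number, var, var_name)

def split_numbers_py (text : String) : String × String :=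
  let r := text.toList.foldl pvStepA ([], [], false)
  (String.ofList r.1, String.ofList r.2.1)

-- ===== PORT B =====
def split_numbers_py_alt (text : String) : String × String :=
  let l := text.toList
  let i := l.findIdx (fun c => !pvAllowed c)
  (String.ofList (l.take i), String.ofList (l.drop i))

-- ===== PRECONDITION & SPEC =====
def Spec_split_numbers_py (text : String) (out : String × String) : Prop := out = split_numbers_py_alt text
instance (text : String) (out : String × String) : Decidable (Spec_split_numbers_py text out) := by unfold Spec_split_numbers_py; infer_instance

-- ===== CLAIM (what is proved, stated in full; the proofs are below) =====
def Claim_equal_split_numbers_py : Prop := ∀ (text : String), Dom_split_numbers_py text → Spec_split_numbers_py text (split_numbers_py text)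

-- ===== LEMMAS AND PROOFS =====
theorem pv_take_findIdx (l : List Char) :
    l.take (l.findIdx (fun c => !pvAllowed c)) = l.takeWhile pvAllowed := by
  induction l with
  | nil => rfl
  | cons c t ih =>
    by_cases h : pvAllowed c <;>
      simp [List.findIdx_cons, h, ih]

theorem pv_drop_findIdx (l : List Char) :
    l.drop (l.findIdx (fun c => !pvAllowed c)) = l.dropWhile pvAllowed := by
  induction l with
  | nil => rfl
  | cons c t ih =>
    by_cases h : pvAllowed c <;>
      simp [List.findIdx_cons, h, ih]

theorem pv_foldl_true (l : List Char) (n v : List Char) :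
    l.foldl pvStepA (n, v, true) = (n, v ++ l, true) := by
  induction l generalizing v with
  | nil => simp
  | cons c t ih => simp [pvStepA, ih]

theorem pv_foldl_false (l : List Char) (n v : List Char) :
    (l.foldl pvStepA (n, v, false)).1 = n ++ l.takeWhile pvAllowed ∧
    (l.foldl pvStepA (n, v, false)).2.1 = v ++ l.dropWhile pvAllowed := by
  induction l generalizing n v with
  | nil => simp
  | cons c t ih =>
    by_cases h : pvAllowed c
    · have := ih (n ++ [c]) v
      simp [pvStepA, h, this.1, this.2]
    · simp [pvStepA, h, pv_foldl_true]

-- ===== VERDICT (by name: the statement is the Claim_ definition above) =====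
theorem split_numbers_py_spec : Claim_equal_split_numbers_py := by
  intro text _
  unfold Spec_split_numbers_py split_numbers_py split_numbers_py_alt
  have h := pv_foldl_false text.toList [] []
  simp [pv_take_findIdx, pv_drop_findIdx, h.1, h.2]
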